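-- pv_equiv track=rewrite | github.com/LeYangNwpu/CodeCraft | contest/Google_2018_0826_RoundE/yogurt_small.py | max_yogurt
-- ===== SOURCE A (Python) =====
-- def max_yogurt(a):
--
--     count = 0
--
--     while len(a) > 0:
--         # find the miniest data
--         day_min = float('inf')
--         ord_del = None
--         for order, ai in enumerate(a):
--             if ai < day_min:
--                 day_min = ai
--                 ord_del = order
--
--         count += 1
--         del a[ord_del]
--         a_new = list()
--         for a_temp in a:
--             a_temp -= 1
--             if a_temp > 0:
--                 a_new.append(a_temp)
--         a = a_new
--     return count
-- ===== SOURCE B (Python) =====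
-- def max_yogurt(a):
--     s = sorted(a)
--     n = len(s)
--     i = 0
--     count = 0
--     while i < n:
--         # one round: the current minimum s[i] is removed and counted ...
--         count += 1
--         i += 1
--         # ... and everything whose value is <= the number of rounds so far
--         # would have decayed to 0 by now and is discarded
--         while i < n and s[i] <= count:
--             i += 1
--     return count
-- ===== Notes on version B (the rewrite author's own statement) =====
-- stated objective: faster
-- what changed: Instead of repeatedly scanning for the minimum, deleting it and rebuilding the list with decremented values, B sorts once and does a single two-pointer sweep: each round consumes the next sorted element and skips all elements whose value is <= the round counter.
import Mathlib
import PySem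

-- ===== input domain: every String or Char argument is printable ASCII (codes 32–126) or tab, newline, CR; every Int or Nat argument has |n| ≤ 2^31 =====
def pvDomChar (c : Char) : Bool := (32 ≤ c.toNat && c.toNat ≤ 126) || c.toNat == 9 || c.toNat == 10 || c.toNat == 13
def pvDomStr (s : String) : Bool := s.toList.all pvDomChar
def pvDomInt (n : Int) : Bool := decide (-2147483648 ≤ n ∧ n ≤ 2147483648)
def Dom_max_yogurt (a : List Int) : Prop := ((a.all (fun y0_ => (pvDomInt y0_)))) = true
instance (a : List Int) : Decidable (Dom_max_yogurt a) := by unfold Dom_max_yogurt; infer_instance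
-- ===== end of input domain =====

-- B replaces A's quadratic remove-min-and-rebuild loop with one sort and a two-pointer sweep
-- (A also mutates its caller's list via `del` in the first round; the equivalence proved here is about the return value).


-- ===== PORT A =====
-- inner `for order, ai in enumerate(a)` scan: day_min starts at float('inf') (so the first
-- element always wins the first `ai < day_min` test — modelled by the `none` state), ord_del
-- starts at None (`none`); returns (day_min, ord_del) after the scan.
def scanMinGo : List Int → Nat → Option Int → Option Nat → Option Int × Option Nat
  | [], _, dayMin, ordDel => (dayMin, ordDel)
  | ai :: rest, idx, dayMin, ordDel =>
    match dayMin with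
    | none => scanMinGo rest (idx + 1) (some ai) (some idx)
    | some m =>
      if ai < m then scanMinGo rest (idx + 1) (some ai) (some idx)
      else scanMinGo rest (idx + 1) dayMin ordDel

-- the rebuild loop `a_temp -= 1; if a_temp > 0: a_new.append(a_temp)`
def decStep (t : List Int) : List Int :=
  t.filterMap (fun aTemp => if aTemp - 1 > 0 then some (aTemp - 1) else none)

-- `del a[ord_del]` followed by the rebuild loop
def aRound (a : List Int) : List Int :=
  decStep (a.eraseIdx ((scanMinGo a 0 none none).2.getD 0))

-- termination facts for the outer loop, cited by `decreasing_by` below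
theorem scanMinGo_spec (rest : List Int) (idx : Nat) (m : Int) (i : Nat) :
    ∃ m' i', scanMinGo rest idx (some m) (some i) = (some m', some i') ∧
      m' ≤ m ∧ (∀ x ∈ rest, m' ≤ x) ∧
      ((m' = m ∧ i' = i) ∨ (∃ j, rest[j]? = some m' ∧ i' = idx + j)) := by
  induction rest generalizing idx m i with
  | nil => exact ⟨m, i, rfl, le_refl _, by simp, Or.inl ⟨rfl, rfl⟩⟩
  | cons ai rest ih =>
    simp only [scanMinGo]
    by_cases h : ai < m
    · rw [if_pos h]
      obtain ⟨m', i', heq, hle, hlb, hcase⟩ := ih (idx + 1) ai idx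
      refine ⟨m', i', heq, by omega, ?_, ?_⟩
      · intro x hx
        rcases List.mem_cons.mp hx with rfl | hx
        · exact hle
        · exact hlb x hx
      · rcases hcase with ⟨rfl, rfl⟩ | ⟨j, hj, rfl⟩
        · exact Or.inr ⟨0, by simp, by omega⟩
        · refine Or.inr ⟨j + 1, by simpa using hj, by omega⟩
    · rw [if_neg h]
      obtain ⟨m', i', heq, hle, hlb, hcase⟩ := ih (idx + 1) m i
      refine ⟨m', i', heq, hle, ?_, ?_⟩
      · intro x hx
        rcases List.mem_cons.mp hx with rfl | hx
        · omega
        · exact hlb x hx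
      · rcases hcase with ⟨rfl, rfl⟩ | ⟨j, hj, rfl⟩
        · exact Or.inl ⟨rfl, rfl⟩
        · exact Or.inr ⟨j + 1, by simpa using hj, by omega⟩

-- on a nonempty list the scan finds a minimal element together with a position holding it
theorem scanMin_cons (x : Int) (t : List Int) :
    ∃ m i, (scanMinGo (x :: t) 0 none none) = (some m, some i) ∧
      (∀ y ∈ x :: t, m ≤ y) ∧ (x :: t)[i]? = some m := by
  simp only [scanMinGo]
  obtain ⟨m', i', heq, hle, hlb, hcase⟩ := scanMinGo_spec t 1 x 0
  refine ⟨m', i', heq, ?_, ?_⟩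
  · intro y hy
    rcases List.mem_cons.mp hy with rfl | hy
    · exact hle
    · exact hlb y hy
  · rcases hcase with ⟨rfl, rfl⟩ | ⟨j, hj, rfl⟩
    · simp
    · rw [show 1 + j = j + 1 by omega]
      simpa using hj

theorem decStep_length_le (t : List Int) : (decStep t).length ≤ t.length :=
  List.length_filterMap_le _ _

theorem aRound_length_lt (x : Int) (t : List Int) : (aRound (x :: t)).length < (x :: t).length := by
  obtain ⟨m, i, heq, _, hget⟩ := scanMin_cons x t
  obtain ⟨hi, _⟩ := List.getElem?_eq_some_iff.mp hget
  have h1 : ((x :: t).eraseIdx ((scanMinGo (x :: t) 0 none none).2.getD 0)).length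
      = (x :: t).length - 1 := by
    rw [heq]
    exact List.length_eraseIdx_of_lt hi
  have h2 := decStep_length_le ((x :: t).eraseIdx ((scanMinGo (x :: t) 0 none none).2.getD 0))
  unfold aRound
  simp only [List.length_cons] at *
  omega

-- outer `while len(a) > 0` loop; `count += 1` each round
def max_yogurt (a : List Int) : Int :=
  match a with
  | [] => 0
  | x :: t => 1 + max_yogurt (aRound (x :: t))
termination_by a.length
decreasing_by exact aRound_length_lt x t

-- ===== PORT B =====
-- the two-pointer sweep of Source B: the outer `while i < n` consumes one element per round
-- (`count += 1; i += 1`), the inner `while i < n and s[i] <= count` skips the elements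
-- that have decayed (ported as dropWhile on the remaining suffix of the sorted list)
def bGo : List Int → Int → Int
  | [], count => count
  | _ :: rest, count =>
    bGo (rest.dropWhile (fun y => decide (y ≤ count + 1))) (count + 1)
termination_by s => s.length
decreasing_by
  calc (rest.dropWhile (fun y => decide (y ≤ count + 1))).length
      ≤ rest.length := List.length_dropWhile_le _ _
    _ < rest.length + 1 := by omega

def max_yogurt_alt (a : List Int) : Int :=
  bGo (PySem.List.sorted a (fun x => x) false) 0

-- ===== PRECONDITION & SPEC =====
def Spec_max_yogurt (a : List Int) (out : Int) : Prop := out = max_yogurt_alt a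
instance (a : List Int) (out : Int) : Decidable (Spec_max_yogurt a out) := by unfold Spec_max_yogurt; infer_instance

-- ===== CLAIM (what is proved, stated in full; the proofs are below) =====
def Claim_equal_max_yogurt : Prop := ∀ (a : List Int), Dom_max_yogurt a → Spec_max_yogurt a (max_yogurt a)

-- ===== LEMMAS AND PROOFS =====

-- proof-only reference simulation: one A-round on an already sorted list
def simS : List Int → Int
  | [] => 0
  | _ :: t => 1 + simS (decStep t)
termination_by s => s.length
decreasing_by
  calc (decStep t).length ≤ t.length := decStep_length_le t
    _ < t.length + 1 := by omega

abbrev sortI (a : List Int) : List Int := PySem.List.sorted a (fun x => x) false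

-- removing the element at position i puts back a permutation: a ~ a[i] :: a.eraseIdx i
theorem perm_get_cons_eraseIdx (a : List Int) (i : Nat) (m : Int) (h : a[i]? = some m) :
    a.Perm (m :: a.eraseIdx i) := by
  induction a generalizing i with
  | nil => simp at h
  | cons x t ih =>
    cases i with
    | zero => simp_all
    | succ i =>
      simp only [List.getElem?_cons_succ] at h
      have h1 := (ih i h).cons x
      rw [List.eraseIdx_cons_succ]
      exact h1.trans (List.Perm.swap m x _)

theorem sortI_cons_of_min (a : List Int) (m : Int) (i : Nat)
    (hget : a[i]? = some m) (hlb : ∀ y ∈ a, m ≤ y) :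
    sortI a = m :: sortI (a.eraseIdx i) := by
  apply PySem.List.sorted_id_eq_of_perm_of_pairwise
  · exact (((PySem.List.sorted_perm _ _ _).cons m).trans
      (perm_get_cons_eraseIdx a i m hget).symm)
  · rw [List.pairwise_cons]
    refine ⟨?_, PySem.List.sorted_pairwise (a.eraseIdx i) (fun x : Int => x)⟩
    intro y hy
    exact hlb y ((perm_get_cons_eraseIdx a i m hget).mem_iff.mpr
      (List.mem_cons_of_mem m ((PySem.List.sorted_perm _ _ _).mem_iff.mp hy)))

-- the decay step commutes with sorting
theorem sortI_decStep (t : List Int) : sortI (decStep t) = decStep (sortI t) := by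
  apply PySem.List.sorted_id_eq_of_perm_of_pairwise
  · exact List.Perm.filterMap _ (PySem.List.sorted_perm t (fun x : Int => x) false)
  · refine List.Pairwise.filterMap _ ?_ (PySem.List.sorted_pairwise t (fun x : Int => x))
    intro a b hab c hc d hd
    split at hc <;> split at hd <;> simp_all
    omega

-- A equals the reference simulation on the sorted input
theorem max_yogurt_eq_simS (a : List Int) : max_yogurt a = simS (sortI a) := by
  generalize hn : a.length = n
  induction n using Nat.strong_induction_on generalizing a with
  | _ n ih =>
    match a with
    | [] =>
      rw [show sortI ([] : List Int) = [] from rfl]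
      simp [max_yogurt, simS]
    | x :: t =>
      obtain ⟨m, i, heq, hlb, hget⟩ := scanMin_cons x t
      obtain ⟨hi, _⟩ := List.getElem?_eq_some_iff.mp hget
      have hround : aRound (x :: t) = decStep ((x :: t).eraseIdx i) := by
        unfold aRound; rw [heq]; rfl
      have hlen : (aRound (x :: t)).length < n := hn ▸ aRound_length_lt x t
      have hrec : max_yogurt (x :: t) = 1 + max_yogurt (aRound (x :: t)) := by
        rw [max_yogurt]
      rw [hrec, ih _ hlen _ rfl, hround, sortI_decStep,
        sortI_cons_of_min (x :: t) m i hget hlb, simS,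
        ← sortI_decStep, sortI_decStep]

-- on a sorted suffix, skipping the decayed elements is exactly the decay step (shifted by c+1)
theorem dropWhile_map_eq_decStep (rest : List Int) (c : Int)
    (hs : rest.Pairwise (fun a b : Int => a ≤ b)) :
    (rest.dropWhile (fun y => decide (y ≤ c + 1))).map (fun x => x - (c + 1))
      = decStep (rest.map (fun x => x - c)) := by
  unfold decStep
  rw [List.filterMap_map]
  induction rest with
  | nil => rfl
  | cons y t ih =>
    rw [List.pairwise_cons] at hs
    by_cases h : y ≤ c + 1
    · rw [List.dropWhile_cons_of_pos (by simpa using h), List.filterMap_cons_none (by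
        simp only [Function.comp_apply]
        rw [if_neg (by omega)])]
      exact ih hs.2
    · rw [List.dropWhile_cons_of_neg (by simpa using h), List.map_cons,
        List.filterMap_cons_some (b := y - (c + 1)) (by
          simp only [Function.comp_apply]
          rw [if_pos (by omega)]
          congr 1
          ring)]
      congr 1
      have hall : ∀ x ∈ t,
          ((fun aTemp => if aTemp - 1 > 0 then some (aTemp - 1) else none) ∘ fun x : Int => x - c) x
            = (some ∘ fun x : Int => x - (c + 1)) x := by
        intro x hx
        have := hs.1 x hx
        simp only [Function.comp_apply]
        rw [if_pos (by omega)]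
        simp only [Option.some.injEq]
        ring
      rw [List.filterMap_congr hall, List.filterMap_eq_map]

-- B's sweep equals the reference simulation (values shifted by the round counter)
theorem bGo_eq_simS (s : List Int) (c : Int) (hs : s.Pairwise (fun a b : Int => a ≤ b)) :
    bGo s c = c + simS (s.map (fun x => x - c)) := by
  generalize hn : s.length = n
  induction n using Nat.strong_induction_on generalizing s c with
  | _ n ih =>
    match s with
    | [] => simp [bGo, simS]
    | x :: rest =>
      rw [List.pairwise_cons] at hs
      have hlen : (rest.dropWhile (fun y => decide (y ≤ c + 1))).length < n := by
        have := List.length_dropWhile_le (fun y => decide (y ≤ c + 1)) rest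
        simp only [List.length_cons] at hn
        omega
      have hsd : (rest.dropWhile (fun y => decide (y ≤ c + 1))).Pairwise
          (fun a b : Int => a ≤ b) := List.Pairwise.sublist (List.dropWhile_sublist _) hs.2
      rw [bGo, ih _ hlen _ (c + 1) hsd rfl, dropWhile_map_eq_decStep rest c hs.2,
        List.map_cons, simS]
      ring

theorem max_yogurt_spec : Claim_equal_max_yogurt := by
  intro a _
  show max_yogurt a = max_yogurt_alt a
  have h0 : (sortI a).Pairwise (fun x y : Int => x ≤ y) :=
    PySem.List.sorted_pairwise a (fun x : Int => x)
  rw [max_yogurt_eq_simS, max_yogurt_alt]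
  rw [show PySem.List.sorted a (fun x => x) false = sortI a from rfl,
    bGo_eq_simS (sortI a) 0 h0]
  simp
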